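-- pv_equiv track=rewrite | github.com/twilson217/bcm-in-nvidia-air | scripts/vnc-console-connect.py | remove_vnc_host_entries
-- ===== SOURCE A (Python) =====
-- def remove_vnc_host_entries(content: str) -> str:
--     """
--     Remove any existing VNC console host entries (those with LocalForward).
--     Also removes VNC header comments and VNC password comments.
--     Preserves the header and main SSH entries (air-bcm-01, bcm).
--     """
--     lines = content.splitlines()
--     result = []
--     skip_block = False
--
--     for i, line in enumerate(lines):
--         # Skip VNC auto-generated header comments
--         if line.strip().startswith("# VNC Console Hosts"):
--             continue
--         if line.strip().startswith("# Usage: ssh -F .ssh/"):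
--             continue
--         if line.strip().startswith("#        Then connect VNC"):
--             continue
--         # Skip VNC password comments (format: # VNC Password: ...)
--         if line.strip().startswith("# VNC Password:"):
--             continue
--
--         # Check if this is a Host line
--         if line.strip().startswith("Host "):
--             host_name = line.split(None, 1)[1].strip() if len(line.split(None, 1)) > 1 else ""
--             # Keep air-bcm-01 and bcm entries
--             if host_name in ("air-bcm-01", "bcm"):
--                 skip_block = False
--                 result.append(line)
--             else:
--                 # Check if the next lines contain LocalForward (VNC entry)
--                 has_localforward = False
--                 for j in range(i + 1, min(i + 10, len(lines))):
--                     if lines[j].strip().startswith("Host "):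
--                         break
--                     if "LocalForward" in lines[j]:
--                         has_localforward = True
--                         break
--
--                 if has_localforward:
--                     skip_block = True
--                 else:
--                     skip_block = False
--                     result.append(line)
--         elif skip_block:
--             continue
--         else:
--             result.append(line)
--
--     # Clean up trailing newlines
--     while result and result[-1] == "":
--         result.pop()
--
--     return "\n".join(result) + "\n" if result else ""
-- ===== SOURCE B (Python) =====
-- def remove_vnc_host_entries(content: str) -> str:
--     lines = content.splitlines()
--
--     def is_host(line):
--         return line.strip().startswith("Host ")
--
--     def is_vnc_comment(line):
--         s = line.strip()
--         return (s.startswith("# VNC Console Hosts")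
--                 or s.startswith("# Usage: ssh -F .ssh/")
--                 or s.startswith("#        Then connect VNC")
--                 or s.startswith("# VNC Password:"))
--
--     kept = []
--     i = 0
--     while i < len(lines) and not is_host(lines[i]):
--         kept.append(lines[i])
--         i += 1
--     while i < len(lines):
--         head = lines[i]
--         j = i + 1
--         while j < len(lines) and not is_host(lines[j]):
--             j += 1
--         body = lines[i + 1:j]
--         parts = head.split(None, 1)
--         name = parts[1].strip() if len(parts) > 1 else ""
--         if name in ("air-bcm-01", "bcm") or not any("LocalForward" in b for b in body[:9]):
--             kept.append(head)
--             kept.extend(body)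
--         i = j
--     kept = [l for l in kept if not is_vnc_comment(l)]
--     while kept and kept[-1] == "":
--         kept.pop()
--     return "\n".join(kept) + "\n" if kept else ""
-- ===== Notes on version B (the rewrite author's own statement) =====
-- stated objective: simpler
-- what changed: B replaces A's single indexed scan with a mutable skip_block flag and a per-Host-line 9-line indexed lookahead by partitioning the lines into a preamble plus whole Host blocks, deciding keep/drop once per block from its body, and filtering the VNC comment lines out in one final pass.
import Mathlib
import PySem

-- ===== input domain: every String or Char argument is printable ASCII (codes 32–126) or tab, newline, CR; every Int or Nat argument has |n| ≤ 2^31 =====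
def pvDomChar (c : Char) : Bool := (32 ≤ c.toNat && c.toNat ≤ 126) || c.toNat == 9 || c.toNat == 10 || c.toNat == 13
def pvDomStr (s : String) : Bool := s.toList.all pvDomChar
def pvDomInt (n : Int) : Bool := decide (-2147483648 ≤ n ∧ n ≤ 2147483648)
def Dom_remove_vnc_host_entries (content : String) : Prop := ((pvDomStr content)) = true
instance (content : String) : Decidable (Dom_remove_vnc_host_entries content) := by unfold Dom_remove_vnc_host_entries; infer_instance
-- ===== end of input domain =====

-- B re-implements A's single indexed scan with lookahead as a partition into a preamble and
-- Host blocks, deciding keep/drop once per block (objective: simpler decomposition, same cost).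

-- shared line predicates (A writes them inline, B as helpers; identical tests)
def pvIsComment (l : String) : Bool :=
  PySem.Str.startswith (PySem.Str.strip l) "# VNC Console Hosts" ||
  PySem.Str.startswith (PySem.Str.strip l) "# Usage: ssh -F .ssh/" ||
  PySem.Str.startswith (PySem.Str.strip l) "#        Then connect VNC" ||
  PySem.Str.startswith (PySem.Str.strip l) "# VNC Password:"

def pvIsHost (l : String) : Bool := PySem.Str.startswith (PySem.Str.strip l) "Host "

-- host_name = line.split(None, 1)[1].strip() if len(line.split(None, 1)) > 1 else ""
def pvHostName (l : String) : String :=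
  let parts := PySem.Str.split₀Max l 1
  if parts.length > 1 then PySem.Str.strip (parts.getD 1 "") else ""

-- result-list cleanup + join, the identical final lines of both Pythons:
-- while result and result[-1] == "": result.pop() ; "\n".join(result) + "\n" if result else ""
def pvFinalize (r : List String) : String :=
  let r := (r.reverse.dropWhile (fun s => s == "")).reverse
  if r.isEmpty then "" else PySem.Str.join "\n" r ++ "\n"

-- ===== PORT A =====
-- inner loop: for j in range(i+1, min(i+10, len(lines))) over the lines after the current one
def pvLookahead : Nat → List String → Bool
  | 0, _ => false
  | _ + 1, [] => false
  | n + 1, l :: t =>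
    if pvIsHost l then false
    else if PySem.Str.isIn "LocalForward" l then true
    else pvLookahead n t

-- the main for-loop of A, state = (remaining lines, skip_block); lookahead reads the lines after i
def pvALoop : List String → Bool → List String
  | [], _ => []
  | l :: rest, skip =>
    if pvIsComment l then pvALoop rest skip
    else if pvIsHost l then
      if pvHostName l == "air-bcm-01" || pvHostName l == "bcm" then
        l :: pvALoop rest false
      else if pvLookahead 9 rest then
        pvALoop rest true
      else
        l :: pvALoop rest false
    else if skip then pvALoop rest skip
    else l :: pvALoop rest skip

def remove_vnc_host_entries (content : String) : String :=
  pvFinalize (pvALoop (PySem.Str.splitlines content) false)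

-- ===== PORT B =====
-- one Host block at a time: head + body up to the next Host line; keep or drop whole block
def pvBBlocks : List String → List String
  | [] => []
  | h :: rest =>
    let body := rest.takeWhile (fun l => !pvIsHost l)
    let rest' := rest.dropWhile (fun l => !pvIsHost l)
    (if pvHostName h == "air-bcm-01" || pvHostName h == "bcm" ||
        !((body.take 9).any (fun b => PySem.Str.isIn "LocalForward" b)) then
      h :: body
    else []) ++ pvBBlocks rest'
  termination_by lines => lines.length
  decreasing_by
    exact Nat.lt_succ_of_le (List.length_dropWhile_le _ _)

def remove_vnc_host_entries_alt (content : String) : String :=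
  let lines := PySem.Str.splitlines content
  let pre := lines.takeWhile (fun l => !pvIsHost l)
  let rest := lines.dropWhile (fun l => !pvIsHost l)
  let kept := (pre ++ pvBBlocks rest).filter (fun l => !pvIsComment l)
  pvFinalize kept

-- ===== PRECONDITION & SPEC =====
def Spec_remove_vnc_host_entries (content : String) (out : String) : Prop := out = remove_vnc_host_entries_alt content
instance (content : String) (out : String) : Decidable (Spec_remove_vnc_host_entries content out) := by unfold Spec_remove_vnc_host_entries; infer_instance

-- ===== CLAIM (what is proved, stated in full; the proofs are below) =====
def Claim_equal_remove_vnc_host_entries : Prop := ∀ (content : String), Dom_remove_vnc_host_entries content → Spec_remove_vnc_host_entries content (remove_vnc_host_entries content)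

-- ===== LEMMAS AND PROOFS =====

-- a line whose stripped form starts with "Host " cannot start with "#" (so never a VNC comment)
lemma host_not_comment {l : String} (h : pvIsHost l = true) : pvIsComment l = false := by
  unfold pvIsHost at h
  unfold pvIsComment
  rw [PySem.Str.startswith_eq, PySem.Chars.startswith_iff] at h
  obtain ⟨t, ht⟩ := h
  have hhead : (PySem.Str.strip l).toList = 'H' :: ('o'::'s'::'t'::' '::t) := by
    rw [← ht]; rfl
  simp only [Bool.or_eq_false_iff]
  refine ⟨⟨⟨?_, ?_⟩, ?_⟩, ?_⟩ <;>
  · rw [PySem.Str.startswith_eq, Bool.eq_false_iff]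
    intro hc
    rw [PySem.Chars.startswith_iff] at hc
    obtain ⟨t2, ht2⟩ := hc
    rw [hhead] at ht2
    simp at ht2

-- the 9-line lookahead sees exactly the first 9 lines of the block body
lemma lookahead_eq (n : Nat) (rest : List String) :
    pvLookahead n rest =
      ((rest.takeWhile (fun l => !pvIsHost l)).take n).any (fun b => PySem.Str.isIn "LocalForward" b) := by
  induction rest generalizing n with
  | nil => cases n <;> simp [pvLookahead]
  | cons l t ih =>
    cases n with
    | zero => simp [pvLookahead]
    | succ n =>
      cases hh : pvIsHost l with
      | true => simp [pvLookahead, hh]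
      | false =>
        cases hLF2 : PySem.Chars.isIn ['L','o','c','a','l','F','o','r','w','a','r','d'] l.toList with
        | false => simp [pvLookahead, hh, hLF2, ih]
        | true => simp [pvLookahead, hh, hLF2]

-- skip_block = true skips exactly the non-Host lines
lemma aloop_skip (body rest' : List String) (hb : ∀ l ∈ body, pvIsHost l = false) :
    pvALoop (body ++ rest') true = pvALoop rest' true := by
  induction body with
  | nil => rfl
  | cons l t ih =>
    have hh : pvIsHost l = false := hb l (by simp)
    have ih' := ih (fun x hx => hb x (by simp [hx]))
    cases hc : pvIsComment l <;> simp [pvALoop, hc, hh, ih']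

-- at a Host-headed (or empty) list, skip_block is irrelevant
lemma aloop_skip_irrel (rest' : List String)
    (h : rest' = [] ∨ ∃ h t, rest' = h :: t ∧ pvIsHost h = true) :
    pvALoop rest' true = pvALoop rest' false := by
  rcases h with rfl | ⟨h, t, rfl, hh⟩
  · rfl
  · simp [pvALoop, host_not_comment hh, hh]

lemma dropWhile_head_false {α : Type} (p : α → Bool) (l : List α) :
    l.dropWhile p = [] ∨ ∃ a t, l.dropWhile p = a :: t ∧ p a = false := by
  induction l with
  | nil => exact Or.inl rfl
  | cons x xs ih =>
    by_cases hx : p x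
    · simpa [List.dropWhile_cons, hx] using ih
    · exact Or.inr ⟨x, xs, by simp [hx], by simpa using hx⟩

lemma takeWhile_dropWhile_nil {α : Type} (p : α → Bool) (l : List α) :
    (l.dropWhile p).takeWhile p = [] := by
  rcases dropWhile_head_false p l with hnil | ⟨a, t, heq, ha⟩
  · simp [hnil]
  · rw [heq]; exact List.takeWhile_cons_of_neg (by simp [ha])

lemma main_lemma : ∀ (n : Nat) (lines : List String), lines.length ≤ n →
    pvALoop lines false =
      ((lines.takeWhile (fun l => !pvIsHost l) ++
        pvBBlocks (lines.dropWhile (fun l => !pvIsHost l))).filter (fun l => !pvIsComment l)) := by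
  intro n
  induction n with
  | zero =>
    intro lines hlen
    have : lines = [] := List.eq_nil_of_length_eq_zero (Nat.le_zero.mp hlen)
    subst this; simp [pvALoop, pvBBlocks]
  | succ n ih =>
    intro lines hlen
    cases lines with
    | nil => simp [pvALoop, pvBBlocks]
    | cons l rest =>
      have hlen' : rest.length ≤ n := Nat.succ_le_succ_iff.mp hlen
      cases hh : pvIsHost l with
      | false =>
        have hrest := ih rest hlen'
        cases hc : pvIsComment l <;>
          simp [pvALoop, hc, hh, hrest]
      | true =>
        have hnc := host_not_comment hh
        rw [List.takeWhile_cons_of_neg (by simp [hh]), List.dropWhile_cons_of_neg (by simp [hh])]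
        have hbodyhost : ∀ x ∈ rest.takeWhile (fun l => !pvIsHost l), pvIsHost x = false := by
          intro x hx; simpa using List.mem_takeWhile_imp hx
        have hB : pvBBlocks (l :: rest) =
            (if pvHostName l == "air-bcm-01" || pvHostName l == "bcm" ||
                !(((rest.takeWhile (fun l => !pvIsHost l)).take 9).any
                    (fun b => PySem.Str.isIn "LocalForward" b)) then
              l :: rest.takeWhile (fun l => !pvIsHost l)
            else []) ++ pvBBlocks (rest.dropWhile (fun l => !pvIsHost l)) := by
          rw [pvBBlocks]
        rw [hB]
        cases hname : (pvHostName l == "air-bcm-01" || pvHostName l == "bcm") with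
        | true =>
          have hrec := ih rest hlen'
          simp [pvALoop, hnc, hh, hname, hrec]
        | false =>
          cases hLF : ((rest.takeWhile (fun l => !pvIsHost l)).take 9).any
              (fun b => PySem.Str.isIn "LocalForward" b) with
          | true =>
            have hLA : pvLookahead 9 rest = true := by rw [lookahead_eq]; exact hLF
            have hskip : pvALoop rest true =
                pvALoop (rest.dropWhile (fun l => !pvIsHost l)) true := by
              conv_lhs => rw [← List.takeWhile_append_dropWhile (p := fun l => !pvIsHost l) (l := rest)]
              exact aloop_skip _ _ hbodyhost
            have hirr : pvALoop (rest.dropWhile (fun l => !pvIsHost l)) true =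
                pvALoop (rest.dropWhile (fun l => !pvIsHost l)) false := by
              apply aloop_skip_irrel
              rcases dropWhile_head_false (fun l => !pvIsHost l) rest with hnil | ⟨a, t, heq, ha⟩
              · exact Or.inl hnil
              · exact Or.inr ⟨a, t, heq, by simpa using ha⟩
            have hrec := ih (rest.dropWhile (fun l => !pvIsHost l))
              (le_trans (List.length_dropWhile_le _ _) hlen')
            rw [takeWhile_dropWhile_nil, List.dropWhile_idempotent] at hrec
            simp [pvALoop, hnc, hh, hname, hLA, hskip, hirr, hrec]
          | false =>
            have hLA : pvLookahead 9 rest = false := by rw [lookahead_eq]; exact hLF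
            have hrec := ih rest hlen'
            simp [pvALoop, hnc, hh, hname, hLA, hrec]

-- ===== VERDICT (by name: the statement is the Claim_ definition above) =====
theorem remove_vnc_host_entries_spec : Claim_equal_remove_vnc_host_entries := by
  intro content _
  unfold Spec_remove_vnc_host_entries remove_vnc_host_entries remove_vnc_host_entries_alt
  exact congrArg pvFinalize (main_lemma _ _ (le_refl _))
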